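-- pv_equiv track=rewrite | github.com/drdeford/sfc_analysis | Single_Core/curves.py | nn12
-- ===== SOURCE A (Python) =====
-- def nn12(point_list):
--     p=[]
--     for j in range(len(point_list)):
--         p.append([j])
--     q=[]
--     for k in range(len(point_list)):
--         q.append([k])
--     for i in range(len(point_list)):
--         x=point_list[i][0]
--         y=point_list[i][1]
--         a=[[x+1,y],[x+1,y+1],[x+1,y-1],[x,y+1],[x,y-1],[x-1,y],[x-1,y+1],[x-1,y-1],[x+2,y],[x,y+2],[x,y-2],[x-2,y]]
--         p[i].append(a)
--     for l in range(len(point_list)):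
--         for m in p[l][1]:
--             for n in range(len(point_list)):
--                 if m[0]==point_list[n][0] and m[1]==point_list[n][1]:
--                     q[l].append(n)
--     return q
-- ===== SOURCE B (Python) =====
-- def _rank(dx, dy):
--     # closed-form classifier of a displacement into the rank 0..11 of the
--     # 12 neighbor offsets (in the fixed output order), or None if not a neighbor
--     if dy == 0:
--         if dx == 1: return 0
--         if dx == -1: return 5
--         if dx == 2: return 8
--         if dx == -2: return 11
--     elif dy == 1:
--         if dx == 1: return 1
--         if dx == 0: return 3
--         if dx == -1: return 6
--     elif dy == -1:
--         if dx == 1: return 2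
--         if dx == 0: return 4
--         if dx == -1: return 7
--     elif dy == 2:
--         if dx == 0: return 9
--     elif dy == -2:
--         if dx == 0: return 10
--     return None
--
--
-- def nn12(point_list):
--     out = []
--     for l, pl in enumerate(point_list):
--         x, y = pl[0], pl[1]
--         buckets = [[] for _ in range(12)]
--         for n, pn in enumerate(point_list):
--             k = _rank(pn[0] - x, pn[1] - y)
--             if k is not None:
--                 buckets[k].append(n)
--         out.append([l] + [n for b in buckets for n in b])
--     return out
-- ===== Notes on version B (the rewrite author's own statement) =====
-- stated objective: faster
-- what changed: B drops A's generate-and-search scheme (12 candidate coordinates per point, each searched by a full scan of the list) and instead makes a single pass over point pairs, classifying each displacement with a closed-form rank function and scattering indices into 12 per-rank buckets that are concatenated into the row.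
import Mathlib
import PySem

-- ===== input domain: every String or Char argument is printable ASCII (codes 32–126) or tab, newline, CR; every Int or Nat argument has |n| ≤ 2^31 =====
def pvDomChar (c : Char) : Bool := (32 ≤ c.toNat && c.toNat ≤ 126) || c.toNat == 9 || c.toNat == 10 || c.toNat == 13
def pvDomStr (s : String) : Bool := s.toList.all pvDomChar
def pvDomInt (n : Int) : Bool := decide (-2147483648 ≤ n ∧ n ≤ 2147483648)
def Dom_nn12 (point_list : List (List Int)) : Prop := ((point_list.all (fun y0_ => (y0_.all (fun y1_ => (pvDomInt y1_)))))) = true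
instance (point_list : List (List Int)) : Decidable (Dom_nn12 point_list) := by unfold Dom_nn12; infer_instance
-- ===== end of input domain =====

-- B replaces A's generate-and-search scheme (12 candidate coordinates per point, each
-- searched by a full scan) with a single pass over pairs that classifies each
-- displacement by a closed-form rank function into 12 buckets (objective: faster,
-- constant-factor; measured faster at the largest timing size).

-- ===== PORT A =====
-- the 12 candidate coordinates 'a', in A's order
def candA (x y : Int) : List (Int × Int) :=
  [(x+1,y),(x+1,y+1),(x+1,y-1),(x,y+1),(x,y-1),(x-1,y),(x-1,y+1),(x-1,y-1),(x+2,y),(x,y+2),(x,y-2),(x-2,y)]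

def nn12 (point_list : List (List Int)) : List (List Int) :=
  -- Python's heterogeneous p[i] = [i, a] is rendered as the pair (i, a)
  let p : List (Int × List (Int × Int)) :=
    (PySem.List.pyRange 0 (PySem.List.len point_list) 1).map (fun i =>
      let pt := PySem.List.pyGetD point_list i []
      let x := PySem.List.pyGetD pt 0 0
      let y := PySem.List.pyGetD pt 1 0
      (i, candA x y))
  -- q[l] starts as [l]; for each m in p[l][1], scan every n and append the matches
  p.map (fun pl_ =>
    pl_.2.foldl (fun q_l m =>
      (PySem.List.pyRange 0 (PySem.List.len point_list) 1).foldl (fun acc n =>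
        let ptn := PySem.List.pyGetD point_list n []
        if m.1 = PySem.List.pyGetD ptn 0 0 ∧ m.2 = PySem.List.pyGetD ptn 1 0
        then acc ++ [n] else acc) q_l) [pl_.1])

-- ===== PORT B =====
-- Source B's _rank: closed-form classifier of a displacement into the rank 0..11
-- of the 12 neighbor offsets, or none (Python None)
def rankB (dx dy : Int) : Option Nat :=
  if dy = 0 then
    (if dx = 1 then some 0 else if dx = -1 then some 5
     else if dx = 2 then some 8 else if dx = -2 then some 11 else none)
  else if dy = 1 then
    (if dx = 1 then some 1 else if dx = 0 then some 3
     else if dx = -1 then some 6 else none)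
  else if dy = -1 then
    (if dx = 1 then some 2 else if dx = 0 then some 4
     else if dx = -1 then some 7 else none)
  else if dy = 2 then (if dx = 0 then some 9 else none)
  else if dy = -2 then (if dx = 0 then some 10 else none)
  else none

-- the inner loop of Source B: scatter each index into the bucket of its rank
def scatterB (point_list : List (List Int)) (x y : Int) : List (List Int) :=
  (PySem.List.enumerate point_list).foldl
    (fun bs np =>
      match rankB (PySem.List.pyGetD np.2 0 0 - x) (PySem.List.pyGetD np.2 1 0 - y) with
      | some k => bs.set k (bs.getD k [] ++ [np.1])
      | none => bs)
    (List.replicate 12 [])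

def nn12_alt (point_list : List (List Int)) : List (List Int) :=
  (PySem.List.enumerate point_list).map (fun lp =>
    let x := PySem.List.pyGetD lp.2 0 0
    let y := PySem.List.pyGetD lp.2 1 0
    [lp.1] ++ (scatterB point_list x y).flatten)

-- ===== PRECONDITION & SPEC =====
-- Pre_ excludes exactly the inputs where Python raises IndexError: a point with fewer than two coordinates.
def Pre_nn12 (point_list : List (List Int)) : Prop := ∀ pt ∈ point_list, 2 ≤ pt.length
instance (point_list : List (List Int)) : Decidable (Pre_nn12 point_list) := by unfold Pre_nn12; infer_instance
def pvWitness_nn12 : List (List Int) := [[0, 0], [1, 0], [0, 2]]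

def Spec_nn12 (point_list : List (List Int)) (out : List (List Int)) : Prop := out = nn12_alt point_list
instance (point_list : List (List Int)) (out : List (List Int)) : Decidable (Spec_nn12 point_list out) := by unfold Spec_nn12; infer_instance

-- ===== CLAIM (what is proved, stated in full; the proofs are below) =====
def Claim_equal_nn12 : Prop := ∀ (point_list : List (List Int)), Dom_nn12 point_list → Pre_nn12 point_list → Spec_nn12 point_list (nn12 point_list)

-- ===== LEMMAS AND PROOFS =====

-- (pt[0], pt[1])
def keyB (pt : List Int) : Int × Int :=
  (PySem.List.pyGetD pt 0 0, PySem.List.pyGetD pt 1 0)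

-- the list of indices whose point matches key m, read off enumerate(point_list)
def matchIdx (point_list : List (List Int)) (m : Int × Int) : List Int :=
  ((PySem.List.enumerate point_list).filter (fun np => keyB np.2 == m)).map (·.1)

-- A's inner scan over all n equals matchIdx
theorem innerA_eq (point_list : List (List Int)) (m : Int × Int) (acc : List Int) :
    (PySem.List.pyRange 0 (PySem.List.len point_list) 1).foldl (fun acc n =>
        let ptn := PySem.List.pyGetD point_list n []
        if m.1 = PySem.List.pyGetD ptn 0 0 ∧ m.2 = PySem.List.pyGetD ptn 1 0
        then acc ++ [n] else acc) acc
      = acc ++ matchIdx point_list m := by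
  have h := PySem.List.foldl_append_if
      (fun n => decide (m.1 = PySem.List.pyGetD (PySem.List.pyGetD point_list n []) 0 0 ∧
                        m.2 = PySem.List.pyGetD (PySem.List.pyGetD point_list n []) 1 0))
      (fun n => n) (PySem.List.pyRange 0 (PySem.List.len point_list) 1) acc
  simp only [decide_eq_true_eq] at h
  rw [h]
  congr 1
  unfold matchIdx
  rw [PySem.List.enumerate_eq_map_pyRange point_list [], List.filter_map, List.map_map]
  have hpq : ∀ n ∈ PySem.List.pyRange 0 (PySem.List.len point_list) 1,
      (decide (m.1 = PySem.List.pyGetD (PySem.List.pyGetD point_list n []) 0 0 ∧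
               m.2 = PySem.List.pyGetD (PySem.List.pyGetD point_list n []) 1 0))
      = ((fun np => keyB np.2 == m) ∘ (fun j => (j, PySem.List.pyGetD point_list j []))) n := by
    intro n _
    simp only [Function.comp, keyB]
    rw [Bool.eq_iff_iff]
    simp only [decide_eq_true_eq, beq_iff_eq, Prod.ext_iff]
    constructor
    · rintro ⟨h1, h2⟩; exact ⟨h1.symm, h2.symm⟩
    · rintro ⟨h1, h2⟩; exact ⟨h1.symm, h2.symm⟩
  rw [List.filter_congr hpq]
  all_goals exact List.map_congr_left (fun j _ => rfl)

-- a row: folding the per-candidate appends from [l]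
theorem row_eq (cs : List (Int × Int)) (g : Int × Int → List Int) (init : List Int)
    (f : List Int → Int × Int → List Int) (hf : ∀ acc m, f acc m = acc ++ g m) :
    cs.foldl f init = init ++ cs.flatMap g := by
  have : f = fun acc m => acc ++ g m := by funext acc m; exact hf acc m
  rw [this, PySem.List.foldl_append_eq_flatMap]

-- rankB always lands in 0..11
theorem rankB_lt (dx dy : Int) (k : Nat) (h : rankB dx dy = some k) : k < 12 := by
  unfold rankB at h; split_ifs at h <;> simp_all <;> omega

-- getD after set
theorem getD_set (l : List (List Int)) (i j : Nat) (v : List Int) :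
    (l.set i v).getD j [] = if j = i ∧ i < l.length then v else l.getD j [] := by
  simp only [List.getD, List.getElem?_set]
  by_cases hij : i = j
  · subst hij
    by_cases hl : i < l.length <;> simp [hl]
  · have : ¬ (j = i ∧ i < l.length) := fun ⟨h1, _⟩ => hij h1.symm
    simp [hij, this]

-- the predicate "index np has rank k relative to (x,y)"
def pRank (x y : Int) (k : Nat) (np : Int × List Int) : Bool :=
  rankB (PySem.List.pyGetD np.2 0 0 - x) (PySem.List.pyGetD np.2 1 0 - y) == some k

-- scatter fold invariant: each bucket collects exactly the indices of its rank
theorem scatter_loop (x y : Int) (L : List (Int × List Int)) :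
    ∀ (init : List (List Int)), init.length = 12 →
      L.foldl (fun bs np =>
          match rankB (PySem.List.pyGetD np.2 0 0 - x) (PySem.List.pyGetD np.2 1 0 - y) with
          | some k => bs.set k (bs.getD k [] ++ [np.1])
          | none => bs) init
        = (List.range 12).map (fun k => init.getD k [] ++ (L.filter (pRank x y k)).map (·.1)) := by
  induction L with
  | nil =>
    intro init hlen
    simp only [List.foldl_nil, List.filter_nil, List.map_nil, List.append_nil]
    apply List.ext_getElem
    · simp [hlen]
    · intro i h1 h2
      simp only [List.getElem_map, List.getElem_range]
      rw [List.getD_eq_getElem _ _ (by omega)]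
  | cons np L ih =>
    intro init hlen
    simp only [List.foldl_cons, List.filter_cons]
    rcases hr : rankB (PySem.List.pyGetD np.2 0 0 - x) (PySem.List.pyGetD np.2 1 0 - y) with _ | k0
    · have hp : ∀ k, pRank x y k np = false := by
        intro k; simp [pRank, hr]
      rw [ih init hlen]
      apply List.map_congr_left
      intro k _
      simp [hp k]
    · have hk0 : k0 < 12 := rankB_lt _ _ _ hr
      rw [ih _ (by simp [hlen])]
      apply List.map_congr_left
      intro k hk
      simp only [List.mem_range] at hk
      rw [getD_set]
      by_cases hkk : k = k0
      · subst hkk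
        have hp : pRank x y k np = true := by simp [pRank, hr]
        simp [hp, hlen, hk]
      · have hp : pRank x y k np = false := by
          simp only [pRank, hr]
          exact decide_eq_false (fun h => hkk h.symm)
        have : ¬ (k = k0 ∧ k0 < init.length) := fun ⟨h1, _⟩ => hkk h1
        simp [this, hp]

-- rankB = some k ↔ the displacement is the k-th offset, for each literal k
theorem rank_iff0 (a b : Int) : rankB a b = some 0 ↔ a = 1 ∧ b = 0 := by
  unfold rankB; split_ifs <;> simp_all
theorem rank_iff1 (a b : Int) : rankB a b = some 1 ↔ a = 1 ∧ b = 1 := by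
  unfold rankB; split_ifs <;> simp_all
theorem rank_iff2 (a b : Int) : rankB a b = some 2 ↔ a = 1 ∧ b = -1 := by
  unfold rankB; split_ifs <;> simp_all
theorem rank_iff3 (a b : Int) : rankB a b = some 3 ↔ a = 0 ∧ b = 1 := by
  unfold rankB; split_ifs <;> simp_all
theorem rank_iff4 (a b : Int) : rankB a b = some 4 ↔ a = 0 ∧ b = -1 := by
  unfold rankB; split_ifs <;> simp_all
theorem rank_iff5 (a b : Int) : rankB a b = some 5 ↔ a = -1 ∧ b = 0 := by
  unfold rankB; split_ifs <;> simp_all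
theorem rank_iff6 (a b : Int) : rankB a b = some 6 ↔ a = -1 ∧ b = 1 := by
  unfold rankB; split_ifs <;> simp_all
theorem rank_iff7 (a b : Int) : rankB a b = some 7 ↔ a = -1 ∧ b = -1 := by
  unfold rankB; split_ifs <;> simp_all
theorem rank_iff8 (a b : Int) : rankB a b = some 8 ↔ a = 2 ∧ b = 0 := by
  unfold rankB; split_ifs <;> simp_all
theorem rank_iff9 (a b : Int) : rankB a b = some 9 ↔ a = 0 ∧ b = 2 := by
  unfold rankB; split_ifs <;> simp_all
theorem rank_iff10 (a b : Int) : rankB a b = some 10 ↔ a = 0 ∧ b = -2 := by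
  unfold rankB; split_ifs <;> simp_all
theorem rank_iff11 (a b : Int) : rankB a b = some 11 ↔ a = -2 ∧ b = 0 := by
  unfold rankB; split_ifs <;> simp_all

-- the k-th bucket of B equals A's matches for the k-th candidate coordinate
theorem bucket_eq_match (point_list : List (List Int)) (x y dx dy : Int) (k : Nat)
    (hiff : ∀ a b : Int, rankB a b = some k ↔ a = dx ∧ b = dy) :
    ((PySem.List.enumerate point_list).filter (pRank x y k)).map (·.1)
      = matchIdx point_list (x + dx, y + dy) := by
  unfold matchIdx
  congr 1
  apply List.filter_congr
  intro np _
  rw [Bool.eq_iff_iff]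
  simp only [pRank, keyB, beq_iff_eq, Prod.ext_iff, hiff]
  omega

-- ===== VERDICT (by name: the statement is the Claim_ definition above) =====
theorem nn12_spec : Claim_equal_nn12 := by
  intro point_list _ _
  unfold Spec_nn12 nn12 nn12_alt
  rw [PySem.List.enumerate_eq_map_pyRange point_list []]
  simp only [List.map_map]
  apply List.map_congr_left
  intro i _
  simp only [Function.comp]
  rw [row_eq _ (fun m => matchIdx point_list m) _ _
        (fun acc m => innerA_eq point_list m acc)]
  congr 1
  unfold scatterB
  rw [scatter_loop _ _ _ _ (by simp)]
  have hrep : ∀ k : Nat, (List.replicate 12 ([]:List Int)).getD k [] = [] := by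
    intro k
    simp only [List.getD_eq_getElem?_getD, List.getElem?_replicate]
    split <;> rfl
  simp only [hrep, List.nil_append]
  have h12 : List.range 12 = [0,1,2,3,4,5,6,7,8,9,10,11] := by decide
  rw [h12]
  simp only [List.map_cons, List.map_nil, List.flatten,
    bucket_eq_match point_list _ _ 1 0 0 rank_iff0,
    bucket_eq_match point_list _ _ 1 1 1 rank_iff1,
    bucket_eq_match point_list _ _ 1 (-1) 2 rank_iff2,
    bucket_eq_match point_list _ _ 0 1 3 rank_iff3,
    bucket_eq_match point_list _ _ 0 (-1) 4 rank_iff4,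
    bucket_eq_match point_list _ _ (-1) 0 5 rank_iff5,
    bucket_eq_match point_list _ _ (-1) 1 6 rank_iff6,
    bucket_eq_match point_list _ _ (-1) (-1) 7 rank_iff7,
    bucket_eq_match point_list _ _ 2 0 8 rank_iff8,
    bucket_eq_match point_list _ _ 0 2 9 rank_iff9,
    bucket_eq_match point_list _ _ 0 (-2) 10 rank_iff10,
    bucket_eq_match point_list _ _ (-2) 0 11 rank_iff11]
  simp [candA, List.flatMap, sub_eq_add_neg]
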